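-- pv_equiv track=rewrite | github.com/neuroglyph/git-mind | tools/changelog/add_entry.py | ensure_date_section
-- ===== SOURCE A (Python) =====
-- def ensure_date_section(lines, date_str):
--     header = f"## {date_str}\n"
--     if any(l.strip() == header.strip() for l in lines):
--         return lines
--     # Insert date header under "## Daily Dev Log" section or append at end
--     new_lines = []
--     inserted = False
--     in_daily = False
--     for i, line in enumerate(lines):
--         new_lines.append(line)
--         if line.startswith('## Daily Dev Log'):
--             in_daily = True
--             continue
--         if in_daily and not inserted:
--             # next blank line is a good insertion point
--             if line.strip() == '' and i + 1 < len(lines):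
--                 new_lines.append(header)
--                 new_lines.append('\n')
--                 inserted = True
--                 in_daily = False
--     if not inserted:
--         if not new_lines or new_lines[-1].strip() != '':
--             new_lines.append('\n')
--         new_lines.append(header)
--         new_lines.append('\n')
--     return new_lines
-- ===== SOURCE B (Python) =====
-- def ensure_date_section(lines, date_str):
--     header = f"## {date_str}\n"
--     if any(l.strip() == header.strip() for l in lines):
--         return lines
--     # locate the "## Daily Dev Log" header, then the first later blank line
--     # that is not the last line; splice the new header in right after it
--     h = next((i for i, l in enumerate(lines) if l.startswith('## Daily Dev Log')), None)
--     if h is not None: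
--         for j in range(h + 1, len(lines) - 1):
--             if lines[j].strip() == '':
--                 return lines[:j + 1] + [header, '\n'] + lines[j + 1:]
--     out = list(lines)
--     if not out or out[-1].strip() != '':
--         out.append('\n')
--     out += [header, '\n']
--     return out
-- ===== Notes on version B (the rewrite author's own statement) =====
-- stated objective: alternative
-- what changed: The stateful flag-driven accumulation loop (inserted/in_daily flags, rebuilding the list line by line) is replaced by index computation — find the '## Daily Dev Log' line, then the first later non-final blank line — followed by a single slice-splice; the fallback appends to the original list.
import Mathlib
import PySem

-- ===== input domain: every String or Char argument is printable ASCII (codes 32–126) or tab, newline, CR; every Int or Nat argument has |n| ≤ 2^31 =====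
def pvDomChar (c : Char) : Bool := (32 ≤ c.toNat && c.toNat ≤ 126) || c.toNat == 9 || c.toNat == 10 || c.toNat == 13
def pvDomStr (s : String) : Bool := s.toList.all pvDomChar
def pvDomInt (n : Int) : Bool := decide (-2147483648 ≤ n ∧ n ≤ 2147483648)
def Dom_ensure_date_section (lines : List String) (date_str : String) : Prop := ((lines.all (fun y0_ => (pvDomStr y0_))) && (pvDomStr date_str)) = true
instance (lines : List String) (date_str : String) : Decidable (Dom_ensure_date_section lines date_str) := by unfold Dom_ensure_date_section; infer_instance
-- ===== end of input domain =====

-- B replaces A's flag-driven accumulation loop by locate-then-splice (find header index,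
-- find first later non-final blank line, slice); same cost, alternative decomposition.

-- ===== PORT A =====
-- one iteration of A's for-loop; state = (i, new_lines, inserted, in_daily)
def aStep (n : Nat) (header : String) (s : Nat × List String × Bool × Bool) (line : String) :
    Nat × List String × Bool × Bool :=
  let nl := s.2.1 ++ [line]
  if PySem.Str.startswith line "## Daily Dev Log" then (s.1 + 1, nl, s.2.2.1, true)
  else if s.2.2.2 && !s.2.2.1 then
    if PySem.Str.strip line = "" ∧ s.1 + 1 < n then (s.1 + 1, nl ++ [header, "\n"], true, false)
    else (s.1 + 1, nl, s.2.2.1, s.2.2.2)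
  else (s.1 + 1, nl, s.2.2.1, s.2.2.2)

def ensure_date_section (lines : List String) (date_str : String) : List String :=
  let header := "## " ++ date_str ++ "\n"
  if lines.any (fun l => PySem.Str.strip l == PySem.Str.strip header) then lines
  else
    let st := lines.foldl (aStep lines.length header) (0, [], false, false)
    if st.2.2.1 then st.2.1
    else
      -- new_lines[-1] is only evaluated when new_lines ≠ [] (Python's `or` short-circuits)
      let nl := if st.2.1 = [] ∨ PySem.Str.strip (st.2.1.getLast?.getD "") ≠ "" then st.2.1 ++ ["\n"] else st.2.1
      nl ++ [header, "\n"]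

-- ===== PORT B =====
-- Source B's `for j in range(h+1, len(lines)-1): if lines[j].strip() == '': return j`
-- (early return ported as an Option-returning index recursion; lines[j] with j < len(lines) is List.getD)
def bSearch (lines : List String) (stop : Nat) (j : Nat) : Option Nat :=
  if j < stop then
    if PySem.Str.strip (lines.getD j "") == "" then some j
    else bSearch lines stop (j + 1)
  else none
termination_by stop - j
decreasing_by omega

def ensure_date_section_alt (lines : List String) (date_str : String) : List String :=
  let header := "## " ++ date_str ++ "\n"
  if lines.any (fun l => PySem.Str.strip l == PySem.Str.strip header) then lines
  else
    let found :=
      match lines.findIdx? (fun l => PySem.Str.startswith l "## Daily Dev Log") with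
      | some h => bSearch lines (lines.length - 1) (h + 1)
      | none => none
    match found with
    -- lines[:j+1] + [header, '\n'] + lines[j+1:]  (slice bounds are nonnegative: take/drop are exact)
    | some j => lines.take (j + 1) ++ [header, "\n"] ++ lines.drop (j + 1)
    | none =>
      let out := if lines = [] ∨ PySem.Str.strip (lines.getLast?.getD "") ≠ "" then lines ++ ["\n"] else lines
      out ++ [header, "\n"]

-- ===== PRECONDITION & SPEC =====
def Spec_ensure_date_section (lines : List String) (date_str : String) (out : List String) : Prop := out = ensure_date_section_alt lines date_str
instance (lines : List String) (date_str : String) (out : List String) : Decidable (Spec_ensure_date_section lines date_str out) := by unfold Spec_ensure_date_section; infer_instance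

-- ===== CLAIM (what is proved, stated in full; the proofs are below) =====
def Claim_equal_ensure_date_section : Prop := ∀ (lines : List String) (date_str : String), Dom_ensure_date_section lines date_str → Spec_ensure_date_section lines date_str (ensure_date_section lines date_str)

-- ===== LEMMAS AND PROOFS =====

-- reductions of one iteration of A's loop
theorem aStep_header (n : Nat) (header : String) (i : Nat) (acc : List String) (ins ind : Bool)
    (line : String) (hP : PySem.Str.startswith line "## Daily Dev Log" = true) :
    aStep n header (i, acc, ins, ind) line = (i + 1, acc ++ [line], ins, true) := by
  simp only [aStep, hP]
  simp

theorem aStep_insert (n : Nat) (header : String) (i : Nat) (acc : List String) (line : String)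
    (hP : PySem.Str.startswith line "## Daily Dev Log" = false)
    (hbl : PySem.Str.strip line = "" ∧ i + 1 < n) :
    aStep n header (i, acc, false, true) line = (i + 1, (acc ++ [line]) ++ [header, "\n"], true, false) := by
  simp only [aStep, hP]
  simp [hbl]

theorem aStep_skip (n : Nat) (header : String) (i : Nat) (acc : List String) (line : String)
    (hP : PySem.Str.startswith line "## Daily Dev Log" = false)
    (hbl : ¬ (PySem.Str.strip line = "" ∧ i + 1 < n)) :
    aStep n header (i, acc, false, true) line = (i + 1, acc ++ [line], false, true) := by
  simp only [aStep, hP]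
  simp [hbl]

theorem aStep_off (n : Nat) (header : String) (i : Nat) (acc : List String) (line : String)
    (hP : PySem.Str.startswith line "## Daily Dev Log" = false) :
    aStep n header (i, acc, false, false) line = (i + 1, acc ++ [line], false, false) := by
  simp only [aStep, hP]
  simp

-- a list of chars starting with '#' does not strip to []
theorem chars_strip_hash_ne_nil (cs : List Char) : PySem.Chars.strip ('#' :: cs) ≠ [] := by
  simp [PySem.Chars.strip, PySem.Chars.lstrip, PySem.Chars.rstrip, PySem.Chars.isspace]
  exact ⟨'#', Or.inr rfl, by decide⟩

-- a line starting with "## Daily Dev Log" does not strip to the empty string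
theorem strip_ne_empty_of_startswith (l : String)
    (h : PySem.Str.startswith l "## Daily Dev Log" = true) : PySem.Str.strip l ≠ "" := by
  simp only [PySem.Str.startswith_eq, PySem.Chars.startswith_iff] at h
  obtain ⟨t, ht⟩ := h
  intro hc
  have h1 : ([] : List Char) = PySem.Chars.strip l.toList := by
    rw [← PySem.Str.toList_strip, hc]; rfl
  have hsh : "## Daily Dev Log".toList ++ t = '#' :: ("# Daily Dev Log".toList ++ t) := rfl
  rw [← ht, hsh] at h1
  exact chars_strip_hash_ne_nil _ h1.symm

-- A's loop over lines none of which start with "## Daily Dev Log", from a flags-off state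
theorem aLoop_noP (n : Nat) (header : String) (xs : List String) :
    ∀ (i : Nat) (acc : List String),
      (∀ l ∈ xs, PySem.Str.startswith l "## Daily Dev Log" = false) →
      xs.foldl (aStep n header) (i, acc, false, false) = (i + xs.length, acc ++ xs, false, false) := by
  induction xs with
  | nil => intro i acc _; simp
  | cons l xs ih =>
    intro i acc hall
    rw [List.foldl_cons, aStep_off n header i acc l (hall l (List.mem_cons_self ..)),
      ih (i + 1) (acc ++ [l]) (fun x hx => hall x (List.mem_cons_of_mem _ hx))]
    simp
    all_goals omega

-- A's loop after insertion: only accumulates, inserted stays true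
theorem aLoop_ins (n : Nat) (header : String) (xs : List String) :
    ∀ (i : Nat) (acc : List String) (ind : Bool),
      ∃ k ind', xs.foldl (aStep n header) (i, acc, true, ind) = (k, acc ++ xs, true, ind') := by
  induction xs with
  | nil => intro i acc ind; exact ⟨i, ind, by simp⟩
  | cons l xs ih =>
    intro i acc ind
    by_cases hP : PySem.Str.startswith l "## Daily Dev Log" = true
    · obtain ⟨k, ind', hk⟩ := ih (i + 1) (acc ++ [l]) true
      exact ⟨k, ind', by rw [List.foldl_cons, aStep_header n header i acc true ind l hP, hk]; simp⟩
    · obtain ⟨k, ind', hk⟩ := ih (i + 1) (acc ++ [l]) ind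
      refine ⟨k, ind', ?_⟩
      rw [List.foldl_cons, show aStep n header (i, acc, true, ind) l = (i + 1, acc ++ [l], true, ind) by
        simp only [aStep, eq_false_of_ne_true hP]
        simp, hk]
      simp

-- the heart: A's loop in the in_daily state, compared with B's bSearch from the same index
theorem aLoop_daily (lines : List String) (header : String) (rest : List String) :
    ∀ (i : Nat), rest = lines.drop i →
      (match bSearch lines (lines.length - 1) i with
       | some j => ∃ k ind', rest.foldl (aStep lines.length header) (i, lines.take i, false, true)
           = (k, lines.take (j + 1) ++ [header, "\n"] ++ lines.drop (j + 1), true, ind')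
       | none => ∃ k, rest.foldl (aStep lines.length header) (i, lines.take i, false, true)
           = (k, lines, false, true)) := by
  induction rest with
  | nil =>
    intro i hi
    have hlen : lines.length ≤ i := by
      by_contra hlt
      have := congrArg List.length hi
      simp [List.length_drop] at this; omega
    rw [bSearch, if_neg (by omega)]
    exact ⟨i, by simp [List.take_of_length_le hlen]⟩
  | cons l rest ih =>
    intro i hi
    have hlt : i < lines.length := by
      by_contra hge
      rw [List.drop_eq_nil_of_le (by omega)] at hi; simp at hi
    have hget : lines[i]? = some l := by
      have h0 : (lines.drop i)[0]? = some l := by rw [← hi]; rfl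
      rwa [List.getElem?_drop] at h0
    have hl : lines.getD i "" = l := by rw [List.getD_eq_getElem?_getD, hget]; rfl
    have hrest : rest = lines.drop (i + 1) := by
      have h2 : (lines.drop i).drop 1 = rest := by rw [← hi]; rfl
      rw [List.drop_drop] at h2
      exact h2.symm
    have htake : lines.take (i + 1) = lines.take i ++ [l] := by
      rw [List.take_add_one, hget]; rfl
    by_cases hP : PySem.Str.startswith l "## Daily Dev Log" = true
    · -- header line: strip l ≠ "", both sides move on to i+1
      have hs := strip_ne_empty_of_startswith l hP
      have hb : bSearch lines (lines.length - 1) i = bSearch lines (lines.length - 1) (i + 1) := by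
        by_cases hstop : i < lines.length - 1
        · rw [bSearch, if_pos hstop, if_neg (by rw [hl]; simp [hs])]
        · rw [bSearch, if_neg hstop, bSearch, if_neg (by omega)]
      rw [hb]
      have hih := ih (i + 1) hrest
      simp only [List.foldl_cons, aStep_header lines.length header i (lines.take i) false true l hP,
        ← htake]
      exact hih
    · have hP' : PySem.Str.startswith l "## Daily Dev Log" = false := eq_false_of_ne_true hP
      by_cases hbl : PySem.Str.strip l = "" ∧ i + 1 < lines.length
      · -- insertion point: A inserts here, bSearch returns i
        rw [show bSearch lines (lines.length - 1) i = some i by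
          rw [bSearch, if_pos (by omega), if_pos (by rw [hl]; simp [hbl.1])]]
        obtain ⟨k, ind', hk⟩ := aLoop_ins lines.length header rest (i + 1)
          ((lines.take i ++ [l]) ++ [header, "\n"]) false
        refine ⟨k, ind', ?_⟩
        rw [List.foldl_cons, aStep_insert lines.length header i (lines.take i) l hP' hbl, hk,
          htake, ← hrest]
      · -- not an insertion point for either side
        have hb : bSearch lines (lines.length - 1) i = bSearch lines (lines.length - 1) (i + 1) := by
          by_cases hstop : i < lines.length - 1
          · have hs : ¬ (PySem.Str.strip l = "") := fun hc => hbl ⟨hc, by omega⟩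
            rw [bSearch, if_pos hstop, if_neg (by rw [hl]; simp [hs])]
          · rw [bSearch, if_neg hstop, bSearch, if_neg (by omega)]
        rw [hb]
        have hih := ih (i + 1) hrest
        simp only [List.foldl_cons, aStep_skip lines.length header i (lines.take i) l hP' hbl,
          ← htake]
        exact hih

-- ===== VERDICT (by name: the statement is the Claim_ definition above) =====
theorem ensure_date_section_spec : Claim_equal_ensure_date_section := by
  intro lines date_str _
  unfold Spec_ensure_date_section
  simp only [ensure_date_section, ensure_date_section_alt]
  by_cases hg : lines.any (fun l => PySem.Str.strip l == PySem.Str.strip ("## " ++ date_str ++ "\n")) = true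
  · simp [hg]
  · simp only [eq_false_of_ne_true hg, Bool.false_eq_true, if_false]
    cases hf : lines.findIdx? (fun l => PySem.Str.startswith l "## Daily Dev Log") with
    | none =>
      have hall : ∀ l ∈ lines, PySem.Str.startswith l "## Daily Dev Log" = false :=
        List.findIdx?_eq_none_iff.mp hf
      rw [aLoop_noP lines.length _ lines 0 [] hall]
      simp
    | some h =>
      obtain ⟨hlt, hPh, hbefore⟩ := List.findIdx?_eq_some_iff_getElem.mp hf
      have hpre : (lines.take h).foldl (aStep lines.length ("## " ++ date_str ++ "\n")) (0, [], false, false)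
          = (h, lines.take h, false, false) := by
        rw [aLoop_noP lines.length _ (lines.take h) 0 []
          (fun x hx => by
            obtain ⟨j, hj, hjx⟩ := List.mem_take_iff_getElem.mp hx
            have hnj := hbefore j (by omega)
            rw [hjx] at hnj
            exact eq_false_of_ne_true hnj)]
        simp [List.length_take, Nat.min_eq_left (le_of_lt hlt)]
      have hsplit : lines.foldl (aStep lines.length ("## " ++ date_str ++ "\n")) (0, [], false, false)
          = (lines.drop h).foldl (aStep lines.length ("## " ++ date_str ++ "\n")) (h, lines.take h, false, false) :=
        calc lines.foldl (aStep lines.length ("## " ++ date_str ++ "\n")) (0, [], false, false)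
            = (lines.take h ++ lines.drop h).foldl (aStep lines.length ("## " ++ date_str ++ "\n")) (0, [], false, false) := by
              rw [List.take_append_drop]
          _ = (lines.drop h).foldl (aStep lines.length ("## " ++ date_str ++ "\n"))
              ((lines.take h).foldl (aStep lines.length ("## " ++ date_str ++ "\n")) (0, [], false, false)) :=
              List.foldl_append
          _ = (lines.drop h).foldl (aStep lines.length ("## " ++ date_str ++ "\n")) (h, lines.take h, false, false) := by
              rw [hpre]
      have hdrop : lines.drop h = lines[h] :: lines.drop (h + 1) := List.drop_eq_getElem_cons hlt
      have htake : lines.take (h + 1) = lines.take h ++ [lines[h]] := by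
        rw [List.take_add_one, List.getElem?_eq_getElem hlt]; rfl
      rw [hsplit, hdrop, List.foldl_cons,
        aStep_header lines.length ("## " ++ date_str ++ "\n") h (lines.take h) false false lines[h] hPh,
        ← htake]
      have hmain := aLoop_daily lines ("## " ++ date_str ++ "\n") (lines.drop (h + 1)) (h + 1) rfl
      cases hb : bSearch lines (lines.length - 1) (h + 1) with
      | some j =>
        rw [hb] at hmain
        obtain ⟨k, ind', hk⟩ := hmain
        rw [hk]
        simp [hb]
      | none =>
        rw [hb] at hmain
        obtain ⟨k, hk⟩ := hmain
        rw [hk]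
        simp [hb]
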